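-- pv_equiv track=rewrite | github.com/Omarleel/ParallelMangaTranslator | Applications/Utilities.py | convertir_a_diccionarios
-- ===== SOURCE A (Python) =====
-- def convertir_a_diccionarios(lista_de_listas):
--     lotes_diccionarios = []
--     indice_acumulado = 0
--     for sublist in lista_de_listas:
--         lote_diccionario = {}
--         for archivo in sublist:
--             lote_diccionario[indice_acumulado] = archivo
--             indice_acumulado += 1
--         lotes_diccionarios.append(lote_diccionario)
--     return lotes_diccionarios
-- ===== SOURCE B (Python) =====
-- def convertir_a_diccionarios(lista_de_listas):
--     # prefix-sum offset table, then an independent pass per sublist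
--     offsets = [0]
--     for sublist in lista_de_listas:
--         offsets.append(offsets[-1] + len(sublist))
--     return [
--         {off + i: archivo for i, archivo in enumerate(sublist)}
--         for off, sublist in zip(offsets, lista_de_listas)
--     ]
-- ===== Notes on version B (the rewrite author's own statement) =====
-- stated objective: alternative
-- what changed: Replaces the single mutable running counter threaded through nested loops with a precomputed prefix-sum offset table and an independent enumerate-based pass per sublist.
import Mathlib
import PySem

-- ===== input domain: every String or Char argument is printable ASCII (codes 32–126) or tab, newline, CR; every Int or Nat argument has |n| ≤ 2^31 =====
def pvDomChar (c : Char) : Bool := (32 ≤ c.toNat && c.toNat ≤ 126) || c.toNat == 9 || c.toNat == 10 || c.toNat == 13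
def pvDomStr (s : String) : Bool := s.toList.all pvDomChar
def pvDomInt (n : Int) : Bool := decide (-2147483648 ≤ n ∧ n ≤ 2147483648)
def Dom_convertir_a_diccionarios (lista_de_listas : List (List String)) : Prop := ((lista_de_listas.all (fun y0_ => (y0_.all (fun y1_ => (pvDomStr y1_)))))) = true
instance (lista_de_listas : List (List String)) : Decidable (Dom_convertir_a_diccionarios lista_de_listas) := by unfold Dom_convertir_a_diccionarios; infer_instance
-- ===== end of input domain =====

-- B replaces A's running counter threaded through nested loops by a precomputed
-- prefix-sum offset table plus an independent enumerate pass per sublist (alternative decomposition, same cost).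

-- ===== PORT A =====
-- inner loop: for archivo in sublist: lote_diccionario[indice_acumulado] = archivo; indice_acumulado += 1
def convAInner (sublist : List String) (st : PySem.Dict Int String × Int) :
    PySem.Dict Int String × Int :=
  sublist.foldl (fun st2 archivo => (st2.1.insert st2.2 archivo, st2.2 + 1)) st

-- outer loop body: build lote_diccionario, append it, carry indice_acumulado
def convAStep (st : List (List (Int × String)) × Int) (sublist : List String) :
    List (List (Int × String)) × Int :=
  let inner := convAInner sublist (PySem.Dict.empty, st.2)
  (st.1 ++ [inner.1.items], inner.2)

def convertir_a_diccionarios (lista_de_listas : List (List String)) : List (List (Int × String)) :=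
  (lista_de_listas.foldl convAStep ([], 0)).1

-- ===== PORT B =====
def convertir_a_diccionarios_alt (lista_de_listas : List (List String)) : List (List (Int × String)) :=
  -- offsets = [0]; for sublist in lista_de_listas: offsets.append(offsets[-1] + len(sublist))
  let offsets : List Int := lista_de_listas.scanl (fun acc sublist => acc + (sublist.length : Int)) 0
  -- [{off + i: archivo for i, archivo in enumerate(sublist)} for off, sublist in zip(offsets, lista_de_listas)]
  (offsets.zip lista_de_listas).map
    (fun p => (PySem.List.enumerate p.2 0).map (fun q => (p.1 + q.1, q.2)))

-- ===== PRECONDITION & SPEC =====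
def Spec_convertir_a_diccionarios (lista_de_listas : List (List String)) (out : List (List (Int × String))) : Prop := out = convertir_a_diccionarios_alt lista_de_listas
instance (lista_de_listas : List (List String)) (out : List (List (Int × String))) : Decidable (Spec_convertir_a_diccionarios lista_de_listas out) := by unfold Spec_convertir_a_diccionarios; infer_instance

-- ===== CLAIM (what is proved, stated in full; the proofs are below) =====
def Claim_equal_convertir_a_diccionarios : Prop := ∀ (lista_de_listas : List (List String)), Dom_convertir_a_diccionarios lista_de_listas → Spec_convertir_a_diccionarios lista_de_listas (convertir_a_diccionarios lista_de_listas)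

-- ===== LEMMAS AND PROOFS =====

lemma enumerate_map_shift (sub : List String) (off s : Int) :
    (PySem.List.enumerate sub s).map (fun q => (off + q.1, q.2))
      = PySem.List.enumerate sub (off + s) := by
  induction sub generalizing s with
  | nil => simp [PySem.List.enumerate_nil]
  | cons a t ih =>
    simp [PySem.List.enumerate_cons, ih, add_assoc]

-- A's inner dict loop, started at a dict whose keys are all below the counter,
-- appends exactly enumerate sub idx and advances the counter by len(sub)
lemma convAInner_eq (sub : List String) (d : PySem.Dict Int String) (idx : Int)
    (h : ∀ k ∈ d.keys, k < idx) :
    convAInner sub (d, idx)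
      = (PySem.Dict.mk (d.items ++ PySem.List.enumerate sub idx), idx + sub.length) := by
  induction sub generalizing d idx with
  | nil =>
    simp [convAInner, PySem.List.enumerate_nil]
  | cons a t ih =>
    have hnc : d.contains idx = false := by
      by_contra hc
      have hct : d.contains idx = true := by
        cases hcc : d.contains idx with
        | true => rfl
        | false => exact absurd hcc hc
      have : idx ∈ d.keys := (PySem.Dict.contains_iff_mem_keys d idx).mp hct
      exact absurd (h idx this) (lt_irrefl idx)
    have hkeys : ∀ k ∈ (d.insert idx a).keys, k < idx + 1 := by
      intro k hk
      rcases (PySem.Dict.mem_keys_insert d idx k a).mp hk with hk | hk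
      · omega
      · have := h k hk; omega
    have step : convAInner (a :: t) (d, idx) = convAInner t (d.insert idx a, idx + 1) := rfl
    rw [step, ih _ _ hkeys]
    rw [PySem.Dict.items_insert_of_not_contains d a hnc]
    refine Prod.ext ?_ ?_
    · apply PySem.Dict.ext
      simp [PySem.List.enumerate_cons, List.append_assoc]
    · show idx + 1 + (t.length : Int) = idx + ((a :: t).length : Int)
      simp only [List.length_cons]
      push_cast
      ring

lemma conv_outer (l : List (List String)) (acc : List (List (Int × String))) (idx : Int) :
    (l.foldl convAStep (acc, idx)).1
      = acc ++ ((l.scanl (fun a s => a + (s.length : Int)) idx).zip l).map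
          (fun p => (PySem.List.enumerate p.2 0).map (fun q => (p.1 + q.1, q.2))) := by
  induction l generalizing acc idx with
  | nil => simp
  | cons x xs ih =>
    have hstep : convAStep (acc, idx) x
        = (acc ++ [PySem.List.enumerate x idx], idx + x.length) := by
      simp only [convAStep]
      rw [convAInner_eq x PySem.Dict.empty idx (by simp [PySem.Dict.keys_empty])]
      have he : (PySem.Dict.empty : PySem.Dict Int String).items = [] := rfl
      simp [he]
    calc (List.foldl convAStep (acc, idx) (x :: xs)).1
        = (List.foldl convAStep (convAStep (acc, idx) x) xs).1 := rfl
      _ = (List.foldl convAStep (acc ++ [PySem.List.enumerate x idx], idx + x.length) xs).1 := by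
          rw [hstep]
      _ = _ := by
          rw [ih]
          have hx : (PySem.List.enumerate x 0).map (fun q => (idx + q.1, q.2))
              = PySem.List.enumerate x idx := by
            simpa using enumerate_map_shift x idx 0
          simp [List.scanl, hx, List.append_assoc]

-- ===== VERDICT (by name: the statement is the Claim_ definition above) =====
theorem convertir_a_diccionarios_spec : Claim_equal_convertir_a_diccionarios := by
  intro l _
  show convertir_a_diccionarios l = convertir_a_diccionarios_alt l
  rw [convertir_a_diccionarios, convertir_a_diccionarios_alt, conv_outer]
  simp
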